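-- pv_equiv track=rewrite | github.com/Jsriprashant/Tcs-Hackathon | backend/src/supervisor/graph.py | create_focused_query
-- ===== SOURCE A (Python) =====
-- from typing import Literal, Any, List, Dict, Optional
--
-- def create_focused_query(original_query: str, domains: List[str]) -> str:
--     """
--     Create a focused query context for domain agents.
--
--     This function extracts the specific aspect the user is asking about
--     and creates a focused prompt that tells agents exactly what to analyze.
--
--     Args:
--         original_query: The user's original query
--         domains: List of detected domains
--
--     Returns:
--         Focused query string for agents
--     """
--     query_lower = original_query.lower()
--
--     # Extract specific focus areas from the query
--     focus_areas = []
--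
--     # Finance-specific focus detection
--     if "finance" in domains:
--         if any(kw in query_lower for kw in ["revenue", "sales", "top line"]):
--             focus_areas.append("revenue and sales performance")
--         if any(kw in query_lower for kw in ["profit", "margin", "earnings", "ebitda"]):
--             focus_areas.append("profitability and margins")
--         if any(kw in query_lower for kw in ["cash", "liquidity", "working capital"]):
--             focus_areas.append("cash flow and liquidity")
--         if any(kw in query_lower for kw in ["debt", "leverage", "liabilities"]):
--             focus_areas.append("debt and leverage")
--         if any(kw in query_lower for kw in ["growth", "trend", "trajectory"]):
--             focus_areas.append("growth trends")
--         if any(kw in query_lower for kw in ["valuation", "multiple", "worth"]):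
--             focus_areas.append("valuation metrics")
--
--     # Legal-specific focus detection
--     if "legal" in domains:
--         if any(kw in query_lower for kw in ["litigation", "lawsuit", "court", "sue"]):
--             focus_areas.append("litigation and legal disputes")
--         if any(kw in query_lower for kw in ["contract", "agreement"]):
--             focus_areas.append("contracts and agreements")
--         if any(kw in query_lower for kw in ["ip", "patent", "trademark", "intellectual"]):
--             focus_areas.append("intellectual property")
--         if any(kw in query_lower for kw in ["compliance", "regulatory", "regulation"]):
--             focus_areas.append("regulatory compliance")
--         if any(kw in query_lower for kw in ["risk", "liability"]):
--             focus_areas.append("legal risks and liabilities")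
--
--     # HR-specific focus detection
--     if "hr" in domains:
--         if any(kw in query_lower for kw in ["employee", "headcount", "staff", "workforce"]):
--             focus_areas.append("workforce and headcount")
--         if any(kw in query_lower for kw in ["attrition", "turnover", "retention"]):
--             focus_areas.append("employee retention and attrition")
--         if any(kw in query_lower for kw in ["culture", "morale", "engagement"]):
--             focus_areas.append("culture and employee engagement")
--         if any(kw in query_lower for kw in ["compensation", "salary", "benefits", "pay"]):
--             focus_areas.append("compensation and benefits")
--         if any(kw in query_lower for kw in ["talent", "key person", "leadership"]):
--             focus_areas.append("key personnel and talent")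
--
--     if focus_areas:
--         return f"FOCUS ANALYSIS ON: {', '.join(focus_areas)}. Original query: {original_query}"
--     else:
--         return f"ANALYZE: {original_query}"
-- ===== SOURCE B (Python) =====
-- # Multi-pattern positional sweep: one pass over the query's positions matches all
-- # active keywords at once (set of matched rule indices), instead of per-rule `in` scans.
-- RULES = [
--     ("finance", ["revenue", "sales", "top line"], "revenue and sales performance"),
--     ("finance", ["profit", "margin", "earnings", "ebitda"], "profitability and margins"),
--     ("finance", ["cash", "liquidity", "working capital"], "cash flow and liquidity"),
--     ("finance", ["debt", "leverage", "liabilities"], "debt and leverage"),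
--     ("finance", ["growth", "trend", "trajectory"], "growth trends"),
--     ("finance", ["valuation", "multiple", "worth"], "valuation metrics"),
--     ("legal", ["litigation", "lawsuit", "court", "sue"], "litigation and legal disputes"),
--     ("legal", ["contract", "agreement"], "contracts and agreements"),
--     ("legal", ["ip", "patent", "trademark", "intellectual"], "intellectual property"),
--     ("legal", ["compliance", "regulatory", "regulation"], "regulatory compliance"),
--     ("legal", ["risk", "liability"], "legal risks and liabilities"),
--     ("hr", ["employee", "headcount", "staff", "workforce"], "workforce and headcount"),
--     ("hr", ["attrition", "turnover", "retention"], "employee retention and attrition"),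
--     ("hr", ["culture", "morale", "engagement"], "culture and employee engagement"),
--     ("hr", ["compensation", "salary", "benefits", "pay"], "compensation and benefits"),
--     ("hr", ["talent", "key person", "leadership"], "key personnel and talent"),
-- ]
--
--
-- def create_focused_query(original_query: str, domains: list) -> str:
--     query_lower = original_query.lower()
--     # keywords of the rules whose domain is active, tagged with their rule index
--     pending = [(kw, i)
--                for i, (domain, keywords, _) in enumerate(RULES)
--                if domain in domains
--                for kw in keywords]
--     # single left-to-right sweep: at each position, record every keyword starting there
--     hit = set()
--     for pos in range(len(query_lower) + 1):
--         for kw, i in pending: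
--             if query_lower.startswith(kw, pos):
--                 hit.add(i)
--     focus_areas = [label for i, (_, _, label) in enumerate(RULES) if i in hit]
--     if focus_areas:
--         return f"FOCUS ANALYSIS ON: {', '.join(focus_areas)}. Original query: {original_query}"
--     return f"ANALYZE: {original_query}"
-- ===== Notes on version B (the rewrite author's own statement) =====
-- stated objective: alternative
-- what changed: Replaces A's per-rule 'keyword in query' substring scans across 17 inline branches by a multi-pattern matcher: one left-to-right sweep over the query's positions that tests every active keyword at each position and collects matched rule indices in a set, then emits labels in rule order.
import Mathlib
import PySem

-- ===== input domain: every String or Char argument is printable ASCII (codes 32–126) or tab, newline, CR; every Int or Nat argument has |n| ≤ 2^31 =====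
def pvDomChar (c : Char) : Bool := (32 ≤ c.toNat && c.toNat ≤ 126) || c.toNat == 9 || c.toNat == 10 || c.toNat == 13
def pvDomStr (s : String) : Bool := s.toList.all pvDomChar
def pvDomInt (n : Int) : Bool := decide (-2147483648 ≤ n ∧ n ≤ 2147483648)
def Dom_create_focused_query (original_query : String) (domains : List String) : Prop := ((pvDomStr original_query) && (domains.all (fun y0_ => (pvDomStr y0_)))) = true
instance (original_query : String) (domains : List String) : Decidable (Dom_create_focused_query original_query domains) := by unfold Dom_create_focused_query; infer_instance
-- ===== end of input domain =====

-- B replaces A's seventeen per-rule 'keyword in query' branches by a multi-pattern positional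
-- sweep: one pass over the query's positions collects the set of matched rule indices (objective: alternative).

-- ===== PORT A =====
def create_focused_query (original_query : String) (domains : List String) : String :=
  let query_lower := PySem.Str.lower original_query
  let focus_areas : List String := []
  let focus_areas :=
    if domains.contains "finance" then
      let focus_areas := if ["revenue", "sales", "top line"].any (fun kw => PySem.Str.isIn kw query_lower) then focus_areas ++ ["revenue and sales performance"] else focus_areas
      let focus_areas := if ["profit", "margin", "earnings", "ebitda"].any (fun kw => PySem.Str.isIn kw query_lower) then focus_areas ++ ["profitability and margins"] else focus_areas
      let focus_areas := if ["cash", "liquidity", "working capital"].any (fun kw => PySem.Str.isIn kw query_lower) then focus_areas ++ ["cash flow and liquidity"] else focus_areas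
      let focus_areas := if ["debt", "leverage", "liabilities"].any (fun kw => PySem.Str.isIn kw query_lower) then focus_areas ++ ["debt and leverage"] else focus_areas
      let focus_areas := if ["growth", "trend", "trajectory"].any (fun kw => PySem.Str.isIn kw query_lower) then focus_areas ++ ["growth trends"] else focus_areas
      let focus_areas := if ["valuation", "multiple", "worth"].any (fun kw => PySem.Str.isIn kw query_lower) then focus_areas ++ ["valuation metrics"] else focus_areas
      focus_areas
    else focus_areas
  let focus_areas :=
    if domains.contains "legal" then
      let focus_areas := if ["litigation", "lawsuit", "court", "sue"].any (fun kw => PySem.Str.isIn kw query_lower) then focus_areas ++ ["litigation and legal disputes"] else focus_areas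
      let focus_areas := if ["contract", "agreement"].any (fun kw => PySem.Str.isIn kw query_lower) then focus_areas ++ ["contracts and agreements"] else focus_areas
      let focus_areas := if ["ip", "patent", "trademark", "intellectual"].any (fun kw => PySem.Str.isIn kw query_lower) then focus_areas ++ ["intellectual property"] else focus_areas
      let focus_areas := if ["compliance", "regulatory", "regulation"].any (fun kw => PySem.Str.isIn kw query_lower) then focus_areas ++ ["regulatory compliance"] else focus_areas
      let focus_areas := if ["risk", "liability"].any (fun kw => PySem.Str.isIn kw query_lower) then focus_areas ++ ["legal risks and liabilities"] else focus_areas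
      focus_areas
    else focus_areas
  let focus_areas :=
    if domains.contains "hr" then
      let focus_areas := if ["employee", "headcount", "staff", "workforce"].any (fun kw => PySem.Str.isIn kw query_lower) then focus_areas ++ ["workforce and headcount"] else focus_areas
      let focus_areas := if ["attrition", "turnover", "retention"].any (fun kw => PySem.Str.isIn kw query_lower) then focus_areas ++ ["employee retention and attrition"] else focus_areas
      let focus_areas := if ["culture", "morale", "engagement"].any (fun kw => PySem.Str.isIn kw query_lower) then focus_areas ++ ["culture and employee engagement"] else focus_areas
      let focus_areas := if ["compensation", "salary", "benefits", "pay"].any (fun kw => PySem.Str.isIn kw query_lower) then focus_areas ++ ["compensation and benefits"] else focus_areas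
      let focus_areas := if ["talent", "key person", "leadership"].any (fun kw => PySem.Str.isIn kw query_lower) then focus_areas ++ ["key personnel and talent"] else focus_areas
      focus_areas
    else focus_areas
  if focus_areas ≠ [] then
    "FOCUS ANALYSIS ON: " ++ PySem.Str.join ", " focus_areas ++ ". Original query: " ++ original_query
  else
    "ANALYZE: " ++ original_query

-- ===== PORT B =====
-- the ordered rule table (RULES in Source B)
def pvRules : List (String × List String × String) :=
  [ ("finance", ["revenue", "sales", "top line"], "revenue and sales performance"),
    ("finance", ["profit", "margin", "earnings", "ebitda"], "profitability and margins"),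
    ("finance", ["cash", "liquidity", "working capital"], "cash flow and liquidity"),
    ("finance", ["debt", "leverage", "liabilities"], "debt and leverage"),
    ("finance", ["growth", "trend", "trajectory"], "growth trends"),
    ("finance", ["valuation", "multiple", "worth"], "valuation metrics"),
    ("legal", ["litigation", "lawsuit", "court", "sue"], "litigation and legal disputes"),
    ("legal", ["contract", "agreement"], "contracts and agreements"),
    ("legal", ["ip", "patent", "trademark", "intellectual"], "intellectual property"),
    ("legal", ["compliance", "regulatory", "regulation"], "regulatory compliance"),
    ("legal", ["risk", "liability"], "legal risks and liabilities"),
    ("hr", ["employee", "headcount", "staff", "workforce"], "workforce and headcount"),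
    ("hr", ["attrition", "turnover", "retention"], "employee retention and attrition"),
    ("hr", ["culture", "morale", "engagement"], "culture and employee engagement"),
    ("hr", ["compensation", "salary", "benefits", "pay"], "compensation and benefits"),
    ("hr", ["talent", "key person", "leadership"], "key personnel and talent") ]

def create_focused_query_alt (original_query : String) (domains : List String) : String :=
  let query_lower := (PySem.Str.lower original_query).toList
  -- pending = [(kw, i) for i, (domain, keywords, _) in enumerate(RULES) if domain in domains for kw in keywords]
  let pending : List (String × Int) :=
    (PySem.List.enumerate pvRules 0).flatMap (fun p =>
      if domains.contains p.2.1 then p.2.2.1.map (fun kw => (kw, p.1)) else [])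
  -- single sweep: for pos in range(len+1): for kw, i in pending: if ql.startswith(kw, pos): hit.add(i)
  -- str.startswith(kw, pos) for 0 ≤ pos is exactly startswith on the suffix from pos (ported by hand)
  let hit : PySem.Set Int :=
    (PySem.List.pyRange 0 ((query_lower.length : Int) + 1) 1).foldl (fun hit pos =>
      pending.foldl (fun hit q =>
        if PySem.Chars.startswith (query_lower.drop pos.toNat) q.1.toList then PySem.Set.add hit q.2 else hit) hit) []
  let focus_areas :=
    (PySem.List.enumerate pvRules 0).filterMap (fun p =>
      if hit.contains p.1 then some p.2.2.2 else none)
  if focus_areas ≠ [] then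
    "FOCUS ANALYSIS ON: " ++ PySem.Str.join ", " focus_areas ++ ". Original query: " ++ original_query
  else
    "ANALYZE: " ++ original_query

-- ===== PRECONDITION & SPEC =====
def Spec_create_focused_query (original_query : String) (domains : List String) (out : String) : Prop := out = create_focused_query_alt original_query domains
instance (original_query : String) (domains : List String) (out : String) : Decidable (Spec_create_focused_query original_query domains out) := by unfold Spec_create_focused_query; infer_instance

-- ===== CLAIM (what is proved, stated in full; the proofs are below) =====
def Claim_equal_create_focused_query : Prop := ∀ (original_query : String) (domains : List String), Dom_create_focused_query original_query domains → Spec_create_focused_query original_query domains (create_focused_query original_query domains)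

-- ===== LEMMAS AND PROOFS =====
-- proof-side helpers: the three groups of pvRules, and A's accumulator chain abstracted
def pvRulesFin : List (String × List String × String) := pvRules.take 6
def pvRulesLeg : List (String × List String × String) := (pvRules.drop 6).take 5
def pvRulesHr : List (String × List String × String) := pvRules.drop 11

def pvChainR (ql : String) (acc : List String) : List (String × List String × String) → List String
  | [] => acc
  | r :: rs => pvChainR ql (if r.2.1.any (fun kw => PySem.Str.isIn kw ql) then acc ++ [r.2.2] else acc) rs

def pvGroupA (ql : String) (acc : List String) (d : Bool) (rs : List (String × List String × String)) : List String :=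
  if d then pvChainR ql acc rs else acc

-- A's whole body, re-expressed through pvGroupA (definitionally equal to the port)
def pvA (original_query : String) (domains : List String) : String :=
  let query_lower := PySem.Str.lower original_query
  let focus_areas :=
    pvGroupA query_lower
      (pvGroupA query_lower
        (pvGroupA query_lower [] (domains.contains "finance") pvRulesFin)
        (domains.contains "legal") pvRulesLeg)
      (domains.contains "hr") pvRulesHr
  if focus_areas ≠ [] then
    "FOCUS ANALYSIS ON: " ++ PySem.Str.join ", " focus_areas ++ ". Original query: " ++ original_query
  else
    "ANALYZE: " ++ original_query

-- the common target form: A's condition per rule, filtered over the table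
def pvCond (domains : List String) (ql : String) (r : String × List String × String) : Bool :=
  domains.contains r.1 && r.2.1.any (fun kw => PySem.Str.isIn kw ql)

theorem pvA_eq (original_query : String) (domains : List String) :
    create_focused_query original_query domains = pvA original_query domains := rfl

theorem pvChainR_eq (ql : String) (rs : List (String × List String × String)) :
    ∀ acc, pvChainR ql acc rs =
      acc ++ rs.filterMap (fun r => if r.2.1.any (fun kw => PySem.Str.isIn kw ql) then some r.2.2 else none) := by
  induction rs with
  | nil => intro acc; simp [pvChainR]
  | cons r rs ih =>
    intro acc
    rw [pvChainR, ih]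
    by_cases hc : (r.2.1.any fun kw => PySem.Str.isIn kw ql) = true
    · rw [if_pos hc,
        List.filterMap_cons_some (by
          show (if (r.2.1.any fun kw => PySem.Str.isIn kw ql) = true then some r.2.2 else none) = some r.2.2
          rw [if_pos hc])]
      simp
    · rw [if_neg hc,
        List.filterMap_cons_none (by
          show (if (r.2.1.any fun kw => PySem.Str.isIn kw ql) = true then some r.2.2 else none) = none
          rw [if_neg hc])]

theorem pvGroupA_eq (domains : List String) (ql : String) (d : Bool)
    (rs : List (String × List String × String)) (h : ∀ r ∈ rs, domains.contains r.1 = d) (acc : List String) :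
    pvGroupA ql acc d rs =
      acc ++ rs.filterMap (fun r => if pvCond domains ql r then some r.2.2 else none) := by
  cases d with
  | false =>
    have hnil : rs.filterMap (fun r => if pvCond domains ql r then some r.2.2 else none) = [] := by
      rw [List.filterMap_eq_nil_iff]
      intro r hr
      have hmem : r.1 ∉ domains := by simpa using h r hr
      simp [pvCond, hmem]
    unfold pvGroupA
    rw [if_neg Bool.false_ne_true, hnil, List.append_nil]
  | true =>
    unfold pvGroupA
    rw [if_pos rfl, pvChainR_eq]
    congr 1
    apply List.filterMap_congr
    intro r hr
    have hmem : r.1 ∈ domains := by simpa using h r hr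
    simp [pvCond, hmem]

-- A = the filterMap form over the whole table
theorem pvA_filterMap (original_query : String) (domains : List String) :
    create_focused_query original_query domains =
      (let ql := PySem.Str.lower original_query
       let focus_areas := pvRules.filterMap (fun r => if pvCond domains ql r then some r.2.2 else none)
       if focus_areas ≠ [] then
         "FOCUS ANALYSIS ON: " ++ PySem.Str.join ", " focus_areas ++ ". Original query: " ++ original_query
       else
         "ANALYZE: " ++ original_query) := by
  rw [pvA_eq]
  unfold pvA
  have hfa :
      pvGroupA (PySem.Str.lower original_query)
        (pvGroupA (PySem.Str.lower original_query)
          (pvGroupA (PySem.Str.lower original_query) [] (domains.contains "finance") pvRulesFin)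
          (domains.contains "legal") pvRulesLeg)
        (domains.contains "hr") pvRulesHr =
      pvRules.filterMap (fun r => if pvCond domains (PySem.Str.lower original_query) r then some r.2.2 else none) := by
    rw [pvGroupA_eq domains _ _ _ (by intro r hr; fin_cases hr <;> rfl),
        pvGroupA_eq domains _ _ _ (by intro r hr; fin_cases hr <;> rfl),
        pvGroupA_eq domains _ _ _ (by intro r hr; fin_cases hr <;> rfl)]
    have hsplit : pvRules = pvRulesFin ++ pvRulesLeg ++ pvRulesHr := rfl
    rw [hsplit, List.filterMap_append, List.filterMap_append, List.nil_append, List.append_assoc]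
  simp only [hfa]

-- B-side lemmas --------------------------------------------------------------

-- membership in the inner fold of the sweep
theorem pv_mem_inner {α : Type} (l : List α) (c : α → Bool) (f : α → Int) (x : Int) :
    ∀ s : PySem.Set Int, x ∈ l.foldl (fun h q => if c q then PySem.Set.add h (f q) else h) s ↔
      x ∈ s ∨ ∃ q ∈ l, c q = true ∧ f q = x := by
  induction l with
  | nil => intro s; simp
  | cons q l ih =>
    intro s
    rw [List.foldl_cons, ih]
    by_cases hc : c q = true
    · rw [if_pos hc]
      simp only [PySem.Set.mem_add, List.mem_cons]
      constructor
      · rintro (⟨h | h⟩ | h)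
        · exact Or.inl h
        · exact Or.inr ⟨q, Or.inl rfl, hc, h.symm⟩
        · obtain ⟨a, ha, hca, hfa⟩ := h; exact Or.inr ⟨a, Or.inr ha, hca, hfa⟩
      · rintro (h | ⟨a, (rfl | ha), hca, hfa⟩)
        · exact Or.inl (Or.inl h)
        · exact Or.inl (Or.inr hfa.symm)
        · exact Or.inr ⟨a, ha, hca, hfa⟩
    · rw [if_neg hc]
      simp only [List.mem_cons]
      constructor
      · rintro (h | ⟨a, ha, hca, hfa⟩)
        · exact Or.inl h
        · exact Or.inr ⟨a, Or.inr ha, hca, hfa⟩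
      · rintro (h | ⟨a, (rfl | ha), hca, hfa⟩)
        · exact Or.inl h
        · exact absurd hca hc
        · exact Or.inr ⟨a, ha, hca, hfa⟩

-- membership in the outer fold (over positions)
theorem pv_mem_outer {β α : Type} (ps : List β) (l : List α) (c : β → α → Bool) (f : α → Int) (x : Int) :
    ∀ s : PySem.Set Int,
      x ∈ ps.foldl (fun h p => l.foldl (fun h q => if c p q then PySem.Set.add h (f q) else h) h) s ↔
      x ∈ s ∨ ∃ p ∈ ps, ∃ q ∈ l, c p q = true ∧ f q = x := by
  induction ps with
  | nil => intro s; simp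
  | cons p ps ih =>
    intro s
    rw [List.foldl_cons, ih, pv_mem_inner]
    constructor
    · rintro ((h | ⟨q, hq, hc, hf⟩) | ⟨p', hp', hrest⟩)
      · exact Or.inl h
      · exact Or.inr ⟨p, List.mem_cons_self .., q, hq, hc, hf⟩
      · exact Or.inr ⟨p', List.mem_cons_of_mem _ hp', hrest⟩
    · rintro (h | ⟨p', hp', q, hq, hc, hf⟩)
      · exact Or.inl (Or.inl h)
      · rcases List.mem_cons.mp hp' with rfl | hp'
        · exact Or.inl (Or.inr ⟨q, hq, hc, hf⟩)
        · exact Or.inr ⟨p', hp', q, hq, hc, hf⟩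

-- a keyword occurs in the query iff it starts at some swept position
theorem pv_occ (cs : List Char) (kw : List Char) :
    (∃ pos ∈ PySem.List.pyRange 0 ((cs.length : Int) + 1) 1,
        PySem.Chars.startswith (cs.drop pos.toNat) kw = true) ↔
      PySem.Chars.isIn kw cs = true := by
  rw [← PySem.Chars.exists_prefix_drop_iff_isIn]
  constructor
  · rintro ⟨pos, _, hs⟩
    exact ⟨pos.toNat, (PySem.Chars.startswith_iff _ _).mp hs⟩
  · rintro ⟨j, hj⟩
    by_cases hle : j ≤ cs.length
    · refine ⟨(j : Int), ?_, ?_⟩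
      · rw [PySem.List.mem_pyRange_one]
        constructor
        · positivity
        · exact_mod_cast Nat.lt_succ_of_le hle
      · rw [Int.toNat_natCast]
        exact (PySem.Chars.startswith_iff _ _).mpr hj
    · have hdrop : cs.drop j = [] := List.drop_eq_nil_of_le (by omega)
      have hkw : kw = [] := by
        have := hj
        rw [hdrop] at this
        exact List.prefix_nil.mp this
      refine ⟨0, ?_, ?_⟩
      · rw [PySem.List.mem_pyRange_one]; omega
      · subst hkw
        exact (PySem.Chars.startswith_iff _ _).mpr (List.nil_prefix)

-- distinct first components in enumerate
theorem pv_enum_fst_inj {α : Type} (xs : List α) (p q : Int × α)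
    (hp : p ∈ PySem.List.enumerate xs 0) (hq : q ∈ PySem.List.enumerate xs 0) (h : p.1 = q.1) : p = q := by
  rw [PySem.List.mem_enumerate_iff] at hp hq
  obtain ⟨k, hk, rfl⟩ := hp
  obtain ⟨k', hk', rfl⟩ := hq
  simp only [zero_add] at h ⊢
  have : k = k' := by exact_mod_cast h
  subst this; rfl

-- filterMap over enumerate that only looks at the element
theorem pv_filterMap_enum {α β : Type} (xs : List α) (g : α → Option β) :
    ∀ s : Int, (PySem.List.enumerate xs s).filterMap (fun p => g p.2) = xs.filterMap g := by
  induction xs with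
  | nil => intro s; simp [PySem.List.enumerate_nil]
  | cons x xs ih => intro s; rw [PySem.List.enumerate_cons, List.filterMap_cons, List.filterMap_cons]
                    cases g x <;> simp [ih]

-- B = the same filterMap form
theorem pvB_filterMap (original_query : String) (domains : List String) :
    create_focused_query_alt original_query domains =
      (let ql := PySem.Str.lower original_query
       let focus_areas := pvRules.filterMap (fun r => if pvCond domains ql r then some r.2.2 else none)
       if focus_areas ≠ [] then
         "FOCUS ANALYSIS ON: " ++ PySem.Str.join ", " focus_areas ++ ". Original query: " ++ original_query
       else
         "ANALYZE: " ++ original_query) := by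
  unfold create_focused_query_alt
  simp only []
  set ql := PySem.Str.lower original_query with hql
  set qlc := ql.toList with hqlc
  set pending : List (String × Int) :=
    (PySem.List.enumerate pvRules 0).flatMap (fun p =>
      if domains.contains p.2.1 then p.2.2.1.map (fun kw => (kw, p.1)) else []) with hpending
  set hit : PySem.Set Int :=
    (PySem.List.pyRange 0 ((qlc.length : Int) + 1) 1).foldl (fun hit pos =>
      pending.foldl (fun hit q =>
        if PySem.Chars.startswith (qlc.drop pos.toNat) q.1.toList then PySem.Set.add hit q.2 else hit) hit) []
    with hhit
  -- characterize membership in hit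
  have hmem : ∀ x : Int, x ∈ hit ↔
      ∃ p ∈ PySem.List.enumerate pvRules 0, domains.contains p.2.1 = true ∧ p.1 = x ∧
        ∃ kw ∈ p.2.2.1, PySem.Chars.isIn kw.toList qlc = true := by
    intro x
    have hmo := pv_mem_outer (PySem.List.pyRange 0 ((qlc.length : Int) + 1) 1) pending
        (fun pos (q : String × Int) => PySem.Chars.startswith (qlc.drop pos.toNat) q.1.toList)
        (fun q => q.2) x []
    simp only [List.not_mem_nil, false_or] at hmo
    rw [hmo]
    constructor
    · rintro ⟨pos, hpos, q, hq, hc, hf⟩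
      rw [hpending, List.mem_flatMap] at hq
      obtain ⟨p, hp, hqp⟩ := hq
      by_cases hd : domains.contains p.2.1 = true
      · rw [if_pos hd, List.mem_map] at hqp
        obtain ⟨kw, hkw, rfl⟩ := hqp
        exact ⟨p, hp, hd, hf, kw, hkw, (pv_occ qlc kw.toList).mp ⟨pos, hpos, hc⟩⟩
      · rw [if_neg hd] at hqp; exact absurd hqp (List.not_mem_nil)
    · rintro ⟨p, hp, hd, hf, kw, hkw, hin⟩
      obtain ⟨pos, hpos, hs⟩ := (pv_occ qlc kw.toList).mpr hin
      refine ⟨pos, hpos, (kw, p.1), ?_, hs, hf⟩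
      rw [hpending, List.mem_flatMap]
      exact ⟨p, hp, by rw [if_pos hd, List.mem_map]; exact ⟨kw, hkw, rfl⟩⟩
  -- rewrite the focus list
  have hfa : (PySem.List.enumerate pvRules 0).filterMap (fun p =>
      if hit.contains p.1 then some p.2.2.2 else none) =
      pvRules.filterMap (fun r => if pvCond domains ql r then some r.2.2 else none) := by
    rw [← pv_filterMap_enum pvRules (fun r => if pvCond domains ql r then some r.2.2 else none) 0]
    apply List.filterMap_congr
    intro p hp
    have : hit.contains p.1 = pvCond domains ql p.2 := by
      rw [Bool.eq_iff_iff, PySem.Set.contains_iff, hmem]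
      constructor
      · rintro ⟨p', hp', hd, hfst, kw, hkw, hin⟩
        cases pv_enum_fst_inj pvRules p' p hp' hp hfst
        unfold pvCond
        rw [Bool.and_eq_true, List.any_eq_true]
        exact ⟨hd, kw, hkw, by rw [PySem.Str.isIn]; exact hin⟩
      · intro hc
        unfold pvCond at hc
        rw [Bool.and_eq_true, List.any_eq_true] at hc
        obtain ⟨hd, kw, hkw, hin⟩ := hc
        refine ⟨p, hp, hd, rfl, kw, hkw, ?_⟩
        rw [PySem.Str.isIn] at hin
        exact hin
    rw [this]
  rw [hfa]

theorem create_focused_query_eq_alt (original_query : String) (domains : List String) :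
    create_focused_query original_query domains = create_focused_query_alt original_query domains := by
  rw [pvA_filterMap, pvB_filterMap]

-- ===== VERDICT (by name: the statement is the Claim_ definition above) =====
theorem create_focused_query_spec : Claim_equal_create_focused_query := by
  intro q d _
  exact create_focused_query_eq_alt q d
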